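-- pv_equiv track=rewrite | github.com/jordi-petit/ap1-codis-2018-2019 | 2018-11-05/a.py | zeros_o_uns
-- ===== SOURCE A (Python) =====
-- def zeros_o_uns(n):
--     q0 = 0
--     q1 = 0
--     while n > 0:
--         if n%2 == 0:
--             q0 += 1
--         else:
--             q1 += 1
--         n = n // 2
--     if q0 > q1:
--         return 0
--     elif q0 < q1:
--         return 1
--     else:
--         return 2
-- ===== SOURCE B (Python) =====
-- def zeros_o_uns(n):
--     if n <= 0:
--         return 2
--     b = bin(n)[2:]
--     q0 = b.count('0')
--     q1 = b.count('1')
--     if q0 > q1: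
--         return 0
--     elif q0 < q1:
--         return 1
--     else:
--         return 2
-- ===== Notes on version B (the rewrite author's own statement) =====
-- stated objective: idiomatic
-- what changed: Replaces the per-bit division/branch while-loop with the binary string representation bin(n)[2:] and str.count of '0' and '1' (n <= 0 returns 2 directly, matching A's empty loop).
import Mathlib
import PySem

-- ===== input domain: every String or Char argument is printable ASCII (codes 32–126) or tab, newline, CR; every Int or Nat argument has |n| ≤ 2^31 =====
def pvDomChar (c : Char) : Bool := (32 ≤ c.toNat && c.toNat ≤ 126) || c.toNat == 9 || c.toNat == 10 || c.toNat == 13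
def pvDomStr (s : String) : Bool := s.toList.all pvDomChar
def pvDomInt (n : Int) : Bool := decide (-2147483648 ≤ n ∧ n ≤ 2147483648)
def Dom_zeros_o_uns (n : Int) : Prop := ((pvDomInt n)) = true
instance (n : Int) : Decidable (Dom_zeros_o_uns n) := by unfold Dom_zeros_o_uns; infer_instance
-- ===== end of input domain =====

-- B replaces A's per-bit division/branch while-loop by building the binary
-- digit string (bin(n)[2:]) once and counting its '0'/'1' characters (idiomatic).

-- ===== PORT A =====
-- A's while-loop: state (n, q0, q1), one bit per iteration.
def zerosLoop (n q0 q1 : Int) : Int × Int :=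
  if h : n > 0 then
    if PySem.Int.mod n 2 = 0 then
      zerosLoop (PySem.Int.floordiv n 2) (q0 + 1) q1
    else
      zerosLoop (PySem.Int.floordiv n 2) q0 (q1 + 1)
  else (q0, q1)
termination_by n.toNat
decreasing_by
  all_goals
    rw [PySem.Int.floordiv_eq_ediv_of_pos (by omega : (0:Int) < 2)]
    omega

def zeros_o_uns (n : Int) : Int :=
  let p := zerosLoop n 0 0
  if p.1 > p.2 then 0
  else if p.1 < p.2 then 1
  else 2

-- ===== PORT B =====
-- bin(n)[2:] for n > 0, as its list of digit characters (hand port, exact for n > 0).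
def binDigits (n : Int) : List Char :=
  if h : n ≤ 0 then []
  else binDigits (PySem.Int.floordiv n 2) ++ [if PySem.Int.mod n 2 = 1 then '1' else '0']
termination_by n.toNat
decreasing_by
  rw [PySem.Int.floordiv_eq_ediv_of_pos (by omega : (0:Int) < 2)]
  omega

def zeros_o_uns_alt (n : Int) : Int :=
  if n ≤ 0 then 2
  else
    let b := binDigits n
    let q0 : Int := b.count '0'
    let q1 : Int := b.count '1'
    if q0 > q1 then 0
    else if q0 < q1 then 1
    else 2

-- ===== PRECONDITION & SPEC =====
def Spec_zeros_o_uns (n : Int) (out : Int) : Prop := out = zeros_o_uns_alt n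
instance (n : Int) (out : Int) : Decidable (Spec_zeros_o_uns n out) := by unfold Spec_zeros_o_uns; infer_instance

-- ===== CLAIM (what is proved, stated in full; the proofs are below) =====
def Claim_equal_zeros_o_uns : Prop := ∀ (n : Int), Dom_zeros_o_uns n → Spec_zeros_o_uns n (zeros_o_uns n)

-- ===== LEMMAS AND PROOFS =====

-- A's loop accumulates exactly the digit counts of B's binary string.
theorem zerosLoop_eq_counts (k : Nat) :
    ∀ (n q0 q1 : Int), n.toNat ≤ k →
      zerosLoop n q0 q1 =
        (q0 + ((binDigits n).count '0' : Int), q1 + ((binDigits n).count '1' : Int)) := by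
  induction k with
  | zero =>
      intro n q0 q1 hk
      have hn : ¬ n > 0 := by omega
      have hle : n ≤ 0 := by omega
      rw [zerosLoop, binDigits]
      simp [hn, hle]
  | succ k ih =>
      intro n q0 q1 hk
      by_cases hn : n > 0
      · have hdiv : PySem.Int.floordiv n 2 = n / 2 :=
          PySem.Int.floordiv_eq_ediv_of_pos (by omega)
        have hmod : PySem.Int.mod n 2 = n % 2 :=
          PySem.Int.mod_eq_emod_of_pos (by omega)
        have hrec : (n / 2).toNat ≤ k := by omega
        have hpos : ¬ n ≤ 0 := by omega
        rw [zerosLoop, binDigits]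
        by_cases hm : n % 2 = 0
        · have hm1 : ¬ n % 2 = 1 := by omega
          simp only [dif_pos hn, hmod, hdiv, if_pos hm, if_neg hm1]
          rw [ih _ _ _ hrec]
          simp [hpos, List.count_append]
          omega
        · have hm1 : n % 2 = 1 := by omega
          simp only [dif_pos hn, hmod, hdiv, if_neg hm, if_pos hm1]
          rw [ih _ _ _ hrec]
          simp [hpos, List.count_append]
          omega
      · have hle : n ≤ 0 := by omega
        rw [zerosLoop, binDigits]
        simp [hn, hle]

-- ===== VERDICT (by name: the statement is the Claim_ definition above) =====
theorem zeros_o_uns_spec : Claim_equal_zeros_o_uns := by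
  intro n _
  unfold Spec_zeros_o_uns zeros_o_uns zeros_o_uns_alt
  rw [zerosLoop_eq_counts n.toNat n 0 0 (le_refl _)]
  by_cases hn : n ≤ 0
  · rw [binDigits]
    simp [hn]
  · simp [hn]
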